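-- pv_equiv track=rewrite | github.com/mhems/aoc | 2020/day24/a.py | generate
-- ===== SOURCE A (Python) =====
-- def generate(path: str):
--     pos = 0
--     while pos < len(path):
--         if path[pos] in 'ns':
--             yield path[pos: pos+2]
--             pos += 2
--         else:
--             yield path[pos]
--             pos += 1
-- ===== SOURCE B (Python) =====
-- def generate(path: str):
--     pending = None
--     for c in path:
--         if pending is not None:
--             yield pending + c
--             pending = None
--         elif c in 'ns':
--             pending = c
--         else:
--             yield c
--     if pending is not None:
--         yield pending
-- ===== Notes on version B (the rewrite author's own statement) =====
-- stated objective: faster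
-- what changed: Replaced index-jumping with look-ahead slicing (pos, path[pos:pos+2]) by a single forward pass over characters carrying a pending prefix, flushed after the loop; avoids per-token indexing/slicing.
import Mathlib
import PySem

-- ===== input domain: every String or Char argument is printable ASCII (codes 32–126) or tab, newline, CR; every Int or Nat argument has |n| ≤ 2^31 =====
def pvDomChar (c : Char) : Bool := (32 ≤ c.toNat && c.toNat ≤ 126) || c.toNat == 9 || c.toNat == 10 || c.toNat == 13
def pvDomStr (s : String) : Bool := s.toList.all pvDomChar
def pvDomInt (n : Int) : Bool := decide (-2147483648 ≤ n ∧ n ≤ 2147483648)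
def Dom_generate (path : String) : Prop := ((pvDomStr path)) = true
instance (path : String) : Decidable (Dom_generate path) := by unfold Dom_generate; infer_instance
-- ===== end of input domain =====

-- B replaces A's index-jumping with look-ahead slicing by a single forward pass carrying a pending 'n'/'s' prefix (objective: alternative decomposition).

-- ===== PORT A =====
-- while pos < len(path): if path[pos] in 'ns' then yield path[pos:pos+2]; pos += 2 else yield path[pos]; pos += 1
def generateAux (cs : List Char) (pos : Nat) : List String :=
  if h : pos < cs.length then
    if cs[pos] = 'n' ∨ cs[pos] = 's' then
      String.ofList (PySem.List.slice cs (some (pos : Int)) (some ((pos : Int) + 2))) :: generateAux cs (pos + 2)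
    else
      String.ofList [cs[pos]] :: generateAux cs (pos + 1)
  else []
termination_by cs.length - pos

def generate (path : String) : List String := generateAux path.toList 0

-- ===== PORT B =====
-- single pass with carried pending prefix, flushed at the end
def generateAltAux (cs : List Char) (pending : Option Char) : List String :=
  match cs, pending with
  | [], none => []
  | [], some p => [String.ofList [p]]
  | c :: rest, some p => String.ofList [p, c] :: generateAltAux rest none
  | c :: rest, none =>
      if c = 'n' ∨ c = 's' then generateAltAux rest (some c)
      else String.ofList [c] :: generateAltAux rest none

def generate_alt (path : String) : List String := generateAltAux path.toList none

-- ===== PRECONDITION & SPEC =====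
def Spec_generate (path : String) (out : List String) : Prop := out = generate_alt path
instance (path : String) (out : List String) : Decidable (Spec_generate path out) := by unfold Spec_generate; infer_instance

-- ===== CLAIM (what is proved, stated in full; the proofs are below) =====
def Claim_equal_generate : Prop := ∀ (path : String), Dom_generate path → Spec_generate path (generate path)

-- ===== LEMMAS AND PROOFS =====

theorem generateAux_eq_alt (cs : List Char) (pos : Nat) :
    generateAux cs pos = generateAltAux (cs.drop pos) none := by
  induction hn : cs.length - pos using Nat.strong_induction_on generalizing pos with
  | _ n ih =>
  unfold generateAux
  by_cases h : pos < cs.length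
  · rw [dif_pos h]
    have hdrop : cs.drop pos = cs[pos] :: cs.drop (pos + 1) := List.drop_eq_getElem_cons h
    have hslice : PySem.List.slice cs (some (pos : Int)) (some ((pos : Int) + 2)) = (cs.drop pos).take 2 := by
      have := PySem.List.slice_natCast_add cs pos 2
      simpa using this
    by_cases hc : cs[pos] = 'n' ∨ cs[pos] = 's'
    · rw [if_pos hc, hdrop]
      simp only [generateAltAux, if_pos hc]
      by_cases h1 : pos + 1 < cs.length
      · have hdrop1 : cs.drop (pos+1) = cs[pos+1] :: cs.drop (pos + 2) := List.drop_eq_getElem_cons h1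
        rw [hdrop1]
        simp only [generateAltAux]
        rw [hslice, hdrop, hdrop1]
        rw [ih (cs.length - (pos+2)) (by omega) (pos+2) rfl]
        simp [List.take]
      · have hdrop1 : cs.drop (pos+1) = [] := List.drop_eq_nil_of_le (by omega)
        rw [hdrop1]
        simp only [generateAltAux]
        rw [hslice, hdrop, hdrop1]
        have : generateAux cs (pos + 2) = [] := by
          unfold generateAux; rw [dif_neg (by omega)]
        rw [this]
        simp [List.take]
    · rw [if_neg hc, hdrop]
      simp only [generateAltAux, if_neg hc]
      rw [ih (cs.length - (pos+1)) (by omega) (pos+1) rfl]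
  · rw [dif_neg h, List.drop_eq_nil_of_le (by omega)]
    rfl

-- ===== VERDICT (by name: the statement is the Claim_ definition above) =====
theorem generate_spec : Claim_equal_generate := by
  intro path _
  show generate path = generate_alt path
  simpa using generateAux_eq_alt path.toList 0
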